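-- pv_equiv track=rewrite | github.com/deeptools/HiCExplorer | hicexplorer/lib/buildMatrixMethods.py | enlarge_bins
-- ===== SOURCE A (Python) =====
-- def enlarge_bins(bin_intervals, chrom_sizes):
--     r"""
--     takes a list of consecutive but not
--     one after the other bin intervals
--     and joins them such that the
--     end and start of consecutive bins
--     is the same.
--
--     >>> chrom_sizes = [('chr1', 100), ('chr2', 100)]
--     >>> bin_intervals =     [('chr1', 10, 30), ('chr1', 50, 80),
--     ... ('chr2', 10, 60), ('chr2', 60, 90)]
--     >>> enlarge_bins(bin_intervals, chrom_sizes)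
--     [('chr1', 0, 40), ('chr1', 40, 100), ('chr2', 0, 60), ('chr2', 60, 100)]
--     """
--     # enlarge remaining bins
--     chr_start = True
--     chrom_sizes_dict = dict(chrom_sizes)
--     for idx in range(len(bin_intervals) - 1):
--         chrom, start, end = bin_intervals[idx]
--         chrom_next, start_next, end_next = bin_intervals[idx + 1]
--         if chr_start is True:
--             start = 0
--             chr_start = False
--         if chrom == chrom_next and \
--                 end != start_next:
--             middle = start_next - int((start_next - end) / 2)
--             bin_intervals[idx] = (chrom, start, middle)
--             bin_intervals[idx + 1] = (chrom, middle, end_next)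
--         if chrom != chrom_next:
--             bin_intervals[idx] = (chrom, start, chrom_sizes_dict[chrom])
--             bin_intervals[idx + 1] = (chrom_next, 0, end_next)
--
--     chrom, start, end = bin_intervals[-1]
--     bin_intervals[-1] = (chrom, start, chrom_sizes_dict[chrom])
--
--     return bin_intervals
-- ===== SOURCE B (Python) =====
-- def enlarge_bins(bin_intervals, chrom_sizes):
--     """Rebuild each bin independently from a snapshot: precompute the cut
--     between every pair of neighbouring bins (None at a chromosome change),
--     then each output bin is (chrom, left cut or 0, right cut or chrom size).
--     Mutates bin_intervals in place like the original and returns it."""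
--     sizes = dict(chrom_sizes)
--     snap = list(bin_intervals)
--     cuts = []  # cuts[i]: shared boundary between bin i and bin i+1, None at a chromosome change
--     for (c1, _s1, e1), (c2, s2, _e2) in zip(snap, snap[1:]):
--         if c1 != c2:
--             cuts.append(None)
--         elif e1 == s2:
--             cuts.append(s2)
--         else:
--             cuts.append(s2 - int((s2 - e1) / 2))
--     lefts = [None] + cuts
--     rights = cuts + [None]
--     for i, ((c, _s, _e), left, right) in enumerate(zip(snap, lefts, rights)):
--         bin_intervals[i] = (c,
--                             0 if left is None else left,
--                             sizes[c] if right is None else right)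
--     return bin_intervals
-- ===== Notes on version B (the rewrite author's own statement) =====
-- stated objective: alternative
-- what changed: Instead of A's single mutating sweep that carries a start value and rewrites pairs in place, B snapshots the bins, precomputes the list of pairwise cut points (None at chromosome changes) and builds every output bin independently from its left/right cut; both mutate bin_intervals in place.
-- intended difference: When the first bin keeps its original start through A's whole loop (a single bin, or a first pair on the same chromosome whose end equals the next start) and that start is nonzero, A returns the first bin with its original start while B returns it with start 0, the intended value per the function's purpose and docstring (bins are stretched to cover the chromosome from 0). — e.g. on enlarge_bins([("chr1", 5, 10)], [("chr1", 100)]): A returns [("chr1", 5, 100)], B returns [("chr1", 0, 100)]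
import Mathlib
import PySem

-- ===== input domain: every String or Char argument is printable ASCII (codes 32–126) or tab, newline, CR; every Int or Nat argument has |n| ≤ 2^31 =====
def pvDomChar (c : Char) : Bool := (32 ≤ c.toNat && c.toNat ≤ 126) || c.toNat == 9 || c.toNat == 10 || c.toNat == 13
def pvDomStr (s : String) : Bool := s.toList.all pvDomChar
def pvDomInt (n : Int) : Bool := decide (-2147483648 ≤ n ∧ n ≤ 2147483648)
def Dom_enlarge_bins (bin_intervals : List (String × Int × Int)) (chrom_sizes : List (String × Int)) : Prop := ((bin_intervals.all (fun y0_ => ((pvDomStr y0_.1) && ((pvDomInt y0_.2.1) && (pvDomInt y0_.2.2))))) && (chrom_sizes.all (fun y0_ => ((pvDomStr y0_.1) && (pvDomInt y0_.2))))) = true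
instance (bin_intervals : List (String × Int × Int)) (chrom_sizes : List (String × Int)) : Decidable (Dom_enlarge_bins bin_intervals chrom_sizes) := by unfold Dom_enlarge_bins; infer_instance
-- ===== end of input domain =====

-- B rebuilds each bin independently from a precomputed list of pairwise cut points instead of
-- A's single mutating sweep with a carried start; both Pythons mutate bin_intervals in place,
-- the equivalence proved here is about the return value (which is that same list).

-- ===== PORT A =====
-- the for-loop over idx in range(len-1): iteration idx reads and writes only bins idx and idx+1,
-- so it is the structural recursion that emits the finished bin idx and carries bin idx+1
-- (uncurried as c/s/e so the recursion is structural on the remaining bins).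
def pvLoopA (sizes : PySem.Dict String Int) (chr_start : Bool) (c : String) (s e : Int) :
    List (String × Int × Int) → List (String × Int × Int)
  | [] => [(c, s, e)]
  | (c2, s2, e2) :: rest =>
    let start := if chr_start then 0 else s
    if c = c2 ∧ e ≠ s2 then
      let middle := s2 - PySem.Int.truncdiv (s2 - e) 2   -- int((start_next - end) / 2)
      (c, start, middle) :: pvLoopA sizes false c middle e2 rest
    else if c ≠ c2 then
      (c, start, sizes.getD c 0) :: pvLoopA sizes false c2 0 e2 rest
    else
      (c, s, e) :: pvLoopA sizes false c2 s2 e2 rest   -- neither branch fired: bin idx left as is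

-- the final 'bin_intervals[-1] = (chrom, start, chrom_sizes_dict[chrom])'
def pvFixLast (sizes : PySem.Dict String Int) (l : List (String × Int × Int)) : List (String × Int × Int) :=
  match l.getLast? with
  | none => l
  | some (c, s, _) => l.dropLast ++ [(c, s, sizes.getD c 0)]

def enlarge_bins (bin_intervals : List (String × Int × Int)) (chrom_sizes : List (String × Int)) : List (String × Int × Int) :=
  let sizes := PySem.Dict.ofList chrom_sizes
  match bin_intervals with
  | [] => []   -- Python raises IndexError on bin_intervals[-1]; excluded by Pre_
  | (c, s, e) :: rest => pvFixLast sizes (pvLoopA sizes true c s e rest)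

-- ===== PORT B =====
-- cut between two neighbouring bins; none marks a chromosome change
def pvCut (x y : String × Int × Int) : Option Int :=
  if x.1 ≠ y.1 then none
  else if x.2.2 = y.2.1 then some y.2.1
  else some (y.2.1 - PySem.Int.truncdiv (y.2.1 - x.2.2) 2)

-- one output bin from the snapshot bin and its left/right cuts
def pvMkBin (sizes : PySem.Dict String Int) (b : String × Int × Int) (left right : Option Int) :
    String × Int × Int :=
  (b.1,
   match left with | none => 0 | some v => v,
   match right with | none => sizes.getD b.1 0 | some v => v)

def enlarge_bins_alt (bin_intervals : List (String × Int × Int)) (chrom_sizes : List (String × Int)) : List (String × Int × Int) :=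
  let sizes := PySem.Dict.ofList chrom_sizes
  let cuts := List.zipWith pvCut bin_intervals bin_intervals.tail
  List.zipWith3 (pvMkBin sizes) bin_intervals ((none : Option Int) :: cuts) (cuts ++ [none])

-- ===== PRECONDITION & SPEC =====
-- Pre_ excludes exactly the inputs where Python A raises: the empty bin list (IndexError on
-- bin_intervals[-1]) and a KeyError on chrom_sizes_dict, which A consults only for the last bin
-- and for each bin followed by a bin of a different chromosome.
def Pre_enlarge_bins (bin_intervals : List (String × Int × Int)) (chrom_sizes : List (String × Int)) : Prop :=
  bin_intervals ≠ [] ∧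
  (∀ p ∈ List.zip bin_intervals bin_intervals.tail, p.1.1 ≠ p.2.1 → p.1.1 ∈ chrom_sizes.map Prod.fst) ∧
  (∀ b ∈ bin_intervals.getLast?.toList, b.1 ∈ chrom_sizes.map Prod.fst)
instance (bin_intervals : List (String × Int × Int)) (chrom_sizes : List (String × Int)) : Decidable (Pre_enlarge_bins bin_intervals chrom_sizes) := by unfold Pre_enlarge_bins; infer_instance

def pvWitness_enlarge_bins : (List (String × Int × Int)) × (List (String × Int)) :=
  ([("chr1", 0, 30), ("chr1", 50, 80), ("chr2", 10, 60)], [("chr1", 100), ("chr2", 100)])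

-- On inputs whose first bin keeps its original start through A's whole loop — a single bin, or a
-- first pair on the same chromosome with end == next start — and that start is nonzero, A returns
-- the first bin with its original nonzero start while B returns it with start 0, which is the
-- intended value: the function's purpose (and docstring) is that each chromosome's bins start at 0.
def D_enlarge_bins (bin_intervals : List (String × Int × Int)) (chrom_sizes : List (String × Int)) : Prop :=
  bin_intervals ≠ [] ∧ bin_intervals.headI.2.1 ≠ 0 ∧
  (bin_intervals.length = 1 ∨
    (2 ≤ bin_intervals.length ∧ bin_intervals.headI.1 = bin_intervals.tail.headI.1 ∧
      bin_intervals.headI.2.2 = bin_intervals.tail.headI.2.1))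
instance (bin_intervals : List (String × Int × Int)) (chrom_sizes : List (String × Int)) : Decidable (D_enlarge_bins bin_intervals chrom_sizes) := by unfold D_enlarge_bins; infer_instance

def Spec_enlarge_bins (bin_intervals : List (String × Int × Int)) (chrom_sizes : List (String × Int)) (out : List (String × Int × Int)) : Prop := ¬ D_enlarge_bins bin_intervals chrom_sizes → out = enlarge_bins_alt bin_intervals chrom_sizes
instance (bin_intervals : List (String × Int × Int)) (chrom_sizes : List (String × Int)) (out : List (String × Int × Int)) : Decidable (Spec_enlarge_bins bin_intervals chrom_sizes out) := by unfold Spec_enlarge_bins; infer_instance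

def pvDiffWitness_enlarge_bins : (List (String × Int × Int)) × (List (String × Int)) :=
  ([("chr1", 5, 10)], [("chr1", 100)])
def pvDiffWitnessOut_enlarge_bins : (List (String × Int × Int)) × (List (String × Int × Int)) :=
  ([("chr1", 5, 100)], [("chr1", 0, 100)])

-- ===== CLAIM (what is proved, stated in full; the proofs are below) =====
def Claim_unchanged_enlarge_bins : Prop := ∀ (bin_intervals : List (String × Int × Int)) (chrom_sizes : List (String × Int)), Dom_enlarge_bins bin_intervals chrom_sizes → Pre_enlarge_bins bin_intervals chrom_sizes → Spec_enlarge_bins bin_intervals chrom_sizes (enlarge_bins bin_intervals chrom_sizes)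
def Claim_changed_enlarge_bins : Prop := Dom_enlarge_bins (pvDiffWitness_enlarge_bins.1) (pvDiffWitness_enlarge_bins.2) ∧ Pre_enlarge_bins (pvDiffWitness_enlarge_bins.1) (pvDiffWitness_enlarge_bins.2) ∧ D_enlarge_bins (pvDiffWitness_enlarge_bins.1) (pvDiffWitness_enlarge_bins.2) ∧ enlarge_bins (pvDiffWitness_enlarge_bins.1) (pvDiffWitness_enlarge_bins.2) = pvDiffWitnessOut_enlarge_bins.1 ∧ enlarge_bins_alt (pvDiffWitness_enlarge_bins.1) (pvDiffWitness_enlarge_bins.2) = pvDiffWitnessOut_enlarge_bins.2 ∧ pvDiffWitnessOut_enlarge_bins.1 ≠ pvDiffWitnessOut_enlarge_bins.2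
def Claim_exact_enlarge_bins : Prop := ∀ (bin_intervals : List (String × Int × Int)) (chrom_sizes : List (String × Int)), Dom_enlarge_bins bin_intervals chrom_sizes → Pre_enlarge_bins bin_intervals chrom_sizes → D_enlarge_bins bin_intervals chrom_sizes → enlarge_bins bin_intervals chrom_sizes ≠ enlarge_bins_alt bin_intervals chrom_sizes

-- ===== LEMMAS AND PROOFS =====

theorem pvLoopA_ne_nil (sizes : PySem.Dict String Int) (b : Bool) (c : String) (s e : Int)
    (t : List (String × Int × Int)) : pvLoopA sizes b c s e t ≠ [] := by
  cases t with
  | nil => simp [pvLoopA]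
  | cons y r =>
    obtain ⟨c2, s2, e2⟩ := y
    simp only [pvLoopA]
    split_ifs <;> simp

theorem pvFixLast_cons (sizes : PySem.Dict String Int) (x : String × Int × Int)
    (t : List (String × Int × Int)) (ht : t ≠ []) :
    pvFixLast sizes (x :: t) = x :: pvFixLast sizes t := by
  cases t with
  | nil => exact absurd rfl ht
  | cons y r =>
    simp only [pvFixLast, List.getLast?_cons_cons]
    cases h : (y :: r).getLast? with
    | none => simp at h
    | some p =>
      obtain ⟨c, s, e⟩ := p
      simp

-- the cut between two bins never reads the left bin's start
theorem pvCuts_start_irrel (c : String) (s s' e : Int) (r : List (String × Int × Int)) :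
    List.zipWith pvCut ((c, s, e) :: r) r = List.zipWith pvCut ((c, s', e) :: r) r := by
  cases r with
  | nil => rfl
  | cons z r' => rfl


-- pvMkBin reads only the chromosome of the snapshot bin, and left cuts `none` and `some 0` both
-- yield start 0, so the head column of a zipWith3 may be adjusted accordingly
theorem pvZip3_congr (sizes : PySem.Dict String Int) (x x' : String × Int × Int)
    (lft lft' : Option Int) (h : ∀ rv : Option Int, pvMkBin sizes x lft rv = pvMkBin sizes x' lft' rv)
    (r : List (String × Int × Int)) (bs cs : List (Option Int)) :
    List.zipWith3 (pvMkBin sizes) (x :: r) (lft :: bs) cs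
      = List.zipWith3 (pvMkBin sizes) (x' :: r) (lft' :: bs) cs := by
  cases cs with
  | nil => rfl
  | cons cc ccs =>
    show pvMkBin sizes x lft cc :: List.zipWith3 (pvMkBin sizes) r bs ccs
        = pvMkBin sizes x' lft' cc :: List.zipWith3 (pvMkBin sizes) r bs ccs
    rw [h]

-- the carried suffix: once A's loop has written (or left) start s in the current head bin, the
-- rest of its run produces exactly B's bins, with left cut `some s` for the head.
theorem pvLoopA_suffix (sizes : PySem.Dict String Int) (rest : List (String × Int × Int))
    (c : String) (s e : Int) :
    pvFixLast sizes (pvLoopA sizes false c s e rest) =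
    List.zipWith3 (pvMkBin sizes) ((c, s, e) :: rest)
      (some s :: List.zipWith pvCut ((c, s, e) :: rest) rest)
      (List.zipWith pvCut ((c, s, e) :: rest) rest ++ [none]) := by
  induction rest generalizing c s e with
  | nil =>
    show [(c, s, sizes.getD c 0)] = _
    rfl
  | cons y r ih =>
    obtain ⟨c2, s2, e2⟩ := y
    simp only [pvLoopA]
    by_cases h1 : c = c2 ∧ e ≠ s2
    · rw [if_pos h1]
      obtain ⟨hc, he⟩ := h1
      rw [pvFixLast_cons _ _ _ (pvLoopA_ne_nil _ _ _ _ _ _), ih]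
      subst hc
      have hcut : pvCut (c, s, e) (c, s2, e2) = some (s2 - PySem.Int.truncdiv (s2 - e) 2) := by
        simp [pvCut, he]
      rw [show List.zipWith pvCut ((c, s, e) :: (c, s2, e2) :: r) ((c, s2, e2) :: r)
            = pvCut (c, s, e) (c, s2, e2) :: List.zipWith pvCut ((c, s2, e2) :: r) r from rfl,
          hcut, pvCuts_start_irrel c (s2 - PySem.Int.truncdiv (s2 - e) 2) s2 e2 r]
      show pvMkBin sizes (c, s, e) (some s) (some (s2 - PySem.Int.truncdiv (s2 - e) 2))
            :: List.zipWith3 (pvMkBin sizes) ((c, s2 - PySem.Int.truncdiv (s2 - e) 2, e2) :: r) _ _ = _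
      rw [pvZip3_congr sizes (c, s2 - PySem.Int.truncdiv (s2 - e) 2, e2) (c, s2, e2)
            (some (s2 - PySem.Int.truncdiv (s2 - e) 2)) (some (s2 - PySem.Int.truncdiv (s2 - e) 2))
            (fun rv => rfl)]
      rfl
    · rw [if_neg h1]
      by_cases h2 : c ≠ c2
      · rw [if_pos h2]
        rw [pvFixLast_cons _ _ _ (pvLoopA_ne_nil _ _ _ _ _ _), ih]
        have hcut : pvCut (c, s, e) (c2, s2, e2) = none := by simp [pvCut, h2]
        rw [show List.zipWith pvCut ((c, s, e) :: (c2, s2, e2) :: r) ((c2, s2, e2) :: r)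
              = pvCut (c, s, e) (c2, s2, e2) :: List.zipWith pvCut ((c2, s2, e2) :: r) r from rfl,
            hcut, pvCuts_start_irrel c2 0 s2 e2 r]
        show pvMkBin sizes (c, s, e) (some s) none
              :: List.zipWith3 (pvMkBin sizes) ((c2, 0, e2) :: r) _ _ = _
        rw [pvZip3_congr sizes (c2, 0, e2) (c2, s2, e2) (some 0) (none : Option Int)
              (fun rv => rfl)]
        rfl
      · rw [if_neg h2]
        push_neg at h2
        have he : e = s2 := by
          rcases not_and_or.mp h1 with h | h
          · exact absurd h2 h
          · push_neg at h; exact h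
        rw [pvFixLast_cons _ _ _ (pvLoopA_ne_nil _ _ _ _ _ _), ih]
        have hcut : pvCut (c, s, e) (c2, s2, e2) = some s2 := by simp [pvCut, h2, he]
        rw [show List.zipWith pvCut ((c, s, e) :: (c2, s2, e2) :: r) ((c2, s2, e2) :: r)
              = pvCut (c, s, e) (c2, s2, e2) :: List.zipWith pvCut ((c2, s2, e2) :: r) r from rfl,
            hcut]
        subst he
        rfl

theorem enlarge_bins_spec : Claim_unchanged_enlarge_bins := by
  intro l cs _ hpre hnd
  obtain ⟨hne, -, -⟩ := hpre
  cases l with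
  | nil => exact absurd rfl hne
  | cons x t =>
    obtain ⟨c, s, e⟩ := x
    cases t with
    | nil =>
      have hs : s = 0 := by
        by_contra hs
        exact hnd ⟨by simp, by simpa using hs, Or.inl (by simp)⟩
      subst hs
      simp [enlarge_bins, enlarge_bins_alt, pvLoopA, pvFixLast, List.zipWith3, pvMkBin]
    | cons y r =>
      obtain ⟨c2, s2, e2⟩ := y
      show pvFixLast (PySem.Dict.ofList cs)
            (pvLoopA (PySem.Dict.ofList cs) true c s e ((c2, s2, e2) :: r)) = _
      set sizes := PySem.Dict.ofList cs with hsizes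
      simp only [pvLoopA, if_true]
      by_cases h1 : c = c2 ∧ e ≠ s2
      · rw [if_pos h1]
        obtain ⟨hc, he⟩ := h1
        rw [pvFixLast_cons _ _ _ (pvLoopA_ne_nil _ _ _ _ _ _), pvLoopA_suffix]
        subst hc
        have hcut : pvCut (c, s, e) (c, s2, e2) = some (s2 - PySem.Int.truncdiv (s2 - e) 2) := by
          simp [pvCut, he]
        show _ = List.zipWith3 (pvMkBin sizes) _
          ((none : Option Int) :: List.zipWith pvCut ((c, s, e) :: (c, s2, e2) :: r) ((c, s2, e2) :: r))
          (List.zipWith pvCut ((c, s, e) :: (c, s2, e2) :: r) ((c, s2, e2) :: r) ++ [none])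
        rw [show List.zipWith pvCut ((c, s, e) :: (c, s2, e2) :: r) ((c, s2, e2) :: r)
              = pvCut (c, s, e) (c, s2, e2) :: List.zipWith pvCut ((c, s2, e2) :: r) r from rfl,
            hcut, pvCuts_start_irrel c (s2 - PySem.Int.truncdiv (s2 - e) 2) s2 e2 r]
        show pvMkBin sizes (c, 0, e) (some 0) (some (s2 - PySem.Int.truncdiv (s2 - e) 2))
              :: List.zipWith3 (pvMkBin sizes) ((c, s2 - PySem.Int.truncdiv (s2 - e) 2, e2) :: r) _ _
            = pvMkBin sizes (c, s, e) none (some (s2 - PySem.Int.truncdiv (s2 - e) 2))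
              :: List.zipWith3 (pvMkBin sizes) ((c, s2, e2) :: r) _ _
        rw [pvZip3_congr sizes (c, s2 - PySem.Int.truncdiv (s2 - e) 2, e2) (c, s2, e2)
              (some (s2 - PySem.Int.truncdiv (s2 - e) 2)) (some (s2 - PySem.Int.truncdiv (s2 - e) 2))
              (fun rv => rfl)]
        rfl
      · rw [if_neg h1]
        by_cases h2 : c ≠ c2
        · rw [if_pos h2]
          rw [pvFixLast_cons _ _ _ (pvLoopA_ne_nil _ _ _ _ _ _), pvLoopA_suffix]
          have hcut : pvCut (c, s, e) (c2, s2, e2) = none := by simp [pvCut, h2]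
          show _ = List.zipWith3 (pvMkBin sizes) _
            ((none : Option Int) :: List.zipWith pvCut ((c, s, e) :: (c2, s2, e2) :: r) ((c2, s2, e2) :: r))
            (List.zipWith pvCut ((c, s, e) :: (c2, s2, e2) :: r) ((c2, s2, e2) :: r) ++ [none])
          rw [show List.zipWith pvCut ((c, s, e) :: (c2, s2, e2) :: r) ((c2, s2, e2) :: r)
                = pvCut (c, s, e) (c2, s2, e2) :: List.zipWith pvCut ((c2, s2, e2) :: r) r from rfl,
              hcut, pvCuts_start_irrel c2 0 s2 e2 r]
          show pvMkBin sizes (c, 0, e) (some 0) none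
                :: List.zipWith3 (pvMkBin sizes) ((c2, 0, e2) :: r) _ _
              = pvMkBin sizes (c, s, e) none none
                :: List.zipWith3 (pvMkBin sizes) ((c2, s2, e2) :: r) _ _
          rw [pvZip3_congr sizes (c2, 0, e2) (c2, s2, e2) (some 0) (none : Option Int)
              (fun rv => rfl)]
          rfl
        · rw [if_neg h2]
          push_neg at h2
          have he : e = s2 := by
            rcases not_and_or.mp h1 with h | h
            · exact absurd h2 h
            · push_neg at h; exact h
          have hs : s = 0 := by
            by_contra hs
            exact hnd ⟨by simp, by simpa using hs,
              Or.inr ⟨by simp, by simpa using h2, by simpa using he⟩⟩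
          subst hs
          rw [pvFixLast_cons _ _ _ (pvLoopA_ne_nil _ _ _ _ _ _), pvLoopA_suffix]
          have hcut : pvCut (c, 0, e) (c2, s2, e2) = some s2 := by simp [pvCut, h2, he]
          show _ = List.zipWith3 (pvMkBin sizes) _
            ((none : Option Int) :: List.zipWith pvCut ((c, 0, e) :: (c2, s2, e2) :: r) ((c2, s2, e2) :: r))
            (List.zipWith pvCut ((c, 0, e) :: (c2, s2, e2) :: r) ((c2, s2, e2) :: r) ++ [none])
          rw [show List.zipWith pvCut ((c, 0, e) :: (c2, s2, e2) :: r) ((c2, s2, e2) :: r)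
                = pvCut (c, 0, e) (c2, s2, e2) :: List.zipWith pvCut ((c2, s2, e2) :: r) r from rfl,
              hcut]
          subst he
          rfl

theorem enlarge_bins_changed : Claim_changed_enlarge_bins := by
  unfold Claim_changed_enlarge_bins; decide

theorem enlarge_bins_tight : Claim_exact_enlarge_bins := by
  intro l cs _ hpre hd heq
  obtain ⟨hne, -, -⟩ := hpre
  obtain ⟨-, hs0, hcase⟩ := hd
  cases l with
  | nil => exact absurd rfl hne
  | cons x t =>
    obtain ⟨c, s, e⟩ := x
    simp only [List.headI] at hs0
    cases t with
    | nil =>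
      have : enlarge_bins [(c, s, e)] cs = [(c, s, (PySem.Dict.ofList cs).getD c 0)] := by
        simp [enlarge_bins, pvLoopA, pvFixLast]
      have hb : enlarge_bins_alt [(c, s, e)] cs = [(c, 0, (PySem.Dict.ofList cs).getD c 0)] := by
        simp [enlarge_bins_alt, List.zipWith3, pvMkBin]
      rw [this, hb] at heq
      exact hs0 (by simpa using heq)
    | cons y r =>
      obtain ⟨c2, s2, e2⟩ := y
      simp only [List.headI, List.tail] at hcase
      have hc : c = c2 ∧ e = s2 := by
        rcases hcase with h | ⟨-, h⟩
        · simp at h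
        · exact h
      -- A leaves the head bin untouched (third branch, tail nonempty)
      have hA : enlarge_bins ((c, s, e) :: (c2, s2, e2) :: r) cs
          = (c, s, e) :: pvFixLast (PySem.Dict.ofList cs)
              (pvLoopA (PySem.Dict.ofList cs) false c2 s2 e2 r) := by
        show pvFixLast _ (pvLoopA _ true c s e ((c2, s2, e2) :: r)) = _
        simp only [pvLoopA]
        rw [if_neg (by simp [hc.2]), if_neg (by simp [hc.1])]
        exact pvFixLast_cons _ _ _ (pvLoopA_ne_nil _ _ _ _ _ _)
      -- B's head bin has start 0
      have hB : enlarge_bins_alt ((c, s, e) :: (c2, s2, e2) :: r) cs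
          = (c, 0, s2) :: List.zipWith3 (pvMkBin (PySem.Dict.ofList cs)) ((c2, s2, e2) :: r)
              (some s2 :: List.zipWith pvCut ((c2, s2, e2) :: r) r)
              (List.zipWith pvCut ((c2, s2, e2) :: r) r ++ [none]) := by
        have hcut : pvCut (c, s, e) (c2, s2, e2) = some s2 := by
          simp [pvCut, hc.1, hc.2]
        show List.zipWith3 (pvMkBin _) _
            ((none : Option Int) :: List.zipWith pvCut ((c, s, e) :: (c2, s2, e2) :: r) ((c2, s2, e2) :: r))
            (List.zipWith pvCut ((c, s, e) :: (c2, s2, e2) :: r) ((c2, s2, e2) :: r) ++ [none]) = _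
        rw [show List.zipWith pvCut ((c, s, e) :: (c2, s2, e2) :: r) ((c2, s2, e2) :: r)
              = pvCut (c, s, e) (c2, s2, e2) :: List.zipWith pvCut ((c2, s2, e2) :: r) r from rfl,
            hcut]
        simp [List.zipWith3, pvMkBin]
      rw [hA, hB] at heq
      have hs : s = 0 := by simpa using congrArg (fun t => t.headI.2.1) heq
      exact hs0 hs
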